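-- pv_equiv track=rewrite | github.com/zc-libre/camoufox-mcp-python | camoufox_mcp/config.py | _split_repeated_csv
-- ===== SOURCE A (Python) =====
-- def _split_repeated_csv(values: list[str] | None) -> list[str]:
--     if not values:
--         return []
--     result: list[str] = []
--     for value in values:
--         for part in value.split(","):
--             item = part.strip()
--             if item:
--                 result.append(item)
--     return result
-- ===== SOURCE B (Python) =====
-- def _split_repeated_csv(values: list[str] | None) -> list[str]:
--     # single character-level scan: build each token directly, skipping leading
--     # whitespace and holding interior whitespace in `pend` until more non-space
--     # characters arrive; no split()/strip() calls.
--     result: list[str] = []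
--     for value in values or []:
--         buf: list[str] = []
--         pend: list[str] = []
--         for ch in value:
--             if ch == ",":
--                 if buf:
--                     result.append("".join(buf))
--                 buf = []
--                 pend = []
--             elif ch.isspace():
--                 if buf:
--                     pend.append(ch)
--             else:
--                 buf.extend(pend)
--                 pend = []
--                 buf.append(ch)
--         if buf:
--             result.append("".join(buf))
--     return result
-- ===== Notes on version B (the rewrite author's own statement) =====
-- stated objective: alternative
-- what changed: Replaces A's split(',')+strip() tokenization with a single character-level state machine that builds each token directly, skipping leading whitespace and buffering interior whitespace until a further non-space character arrives.
import Mathlib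
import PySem

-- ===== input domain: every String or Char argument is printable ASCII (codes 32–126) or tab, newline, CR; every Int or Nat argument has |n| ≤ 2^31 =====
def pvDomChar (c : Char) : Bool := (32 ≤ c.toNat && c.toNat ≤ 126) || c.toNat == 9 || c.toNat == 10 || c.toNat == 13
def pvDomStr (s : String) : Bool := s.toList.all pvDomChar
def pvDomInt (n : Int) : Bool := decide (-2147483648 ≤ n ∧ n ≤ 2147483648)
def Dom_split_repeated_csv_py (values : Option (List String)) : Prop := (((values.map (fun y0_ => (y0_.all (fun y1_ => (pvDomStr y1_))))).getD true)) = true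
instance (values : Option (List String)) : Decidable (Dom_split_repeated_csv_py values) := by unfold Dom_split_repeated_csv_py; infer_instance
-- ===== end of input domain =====

-- B replaces A's split(",")/strip() tokenization by one character-level state machine
-- that builds each token directly (leading whitespace skipped, interior whitespace
-- buffered until more non-space characters arrive); objective: alternative.

-- ===== PORT A =====
-- for value in values: for part in value.split(","): item = part.strip(); if item: result.append(item)
def split_repeated_csv_py (values : Option (List String)) : List String :=
  match values with
  | none => []
  | some vs =>
    if vs = [] then []  -- 'if not values: return []'
    else
      vs.foldl (fun result value =>
        (PySem.Chars.splitOn value.toList ",".toList).foldl (fun result part =>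
          let item := String.ofList (PySem.Chars.strip part)
          if item ≠ "" then result ++ [item] else result) result) []

-- ===== PORT B =====
-- the per-character step: `for ch in value: if ch == "," … elif ch.isspace() … else …`
def pvStepB (st : List String × List Char × List Char) (c : Char) :
    List String × List Char × List Char :=
  let (res, buf, pend) := st
  if c = ',' then
    (res ++ (if buf ≠ [] then [String.ofList buf] else []), [], [])
  else if PySem.Chars.isspace c then
    (res, buf, if buf ≠ [] then pend ++ [c] else pend)
  else
    (res, buf ++ pend ++ [c], [])

-- 'for value in values or []: buf=[]; pend=[]; for ch in value: …; if buf: result.append(...)'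
def split_repeated_csv_py_alt (values : Option (List String)) : List String :=
  (values.getD []).foldl (fun result value =>
    let st := value.toList.foldl pvStepB (result, [], [])
    st.1 ++ (if st.2.1 ≠ [] then [String.ofList st.2.1] else [])) []

-- ===== PRECONDITION & SPEC =====
def Spec_split_repeated_csv_py (values : Option (List String)) (out : List String) : Prop := out = split_repeated_csv_py_alt values
instance (values : Option (List String)) (out : List String) : Decidable (Spec_split_repeated_csv_py values out) := by unfold Spec_split_repeated_csv_py; infer_instance

-- ===== CLAIM (what is proved, stated in full; the proofs are below) =====
def Claim_equal_split_repeated_csv_py : Prop := ∀ (values : Option (List String)), Dom_split_repeated_csv_py values → Spec_split_repeated_csv_py values (split_repeated_csv_py values)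

-- ===== LEMMAS AND PROOFS =====

-- reference recursion for splitting a char list on ','
def sp : List Char → List (List Char)
  | [] => [[]]
  | c :: rest => if c = ',' then [] :: sp rest else (sp rest).modifyHead (c :: ·)

theorem go_eq (fuel : Nat) : ∀ (l : List Char), l.length < fuel → ∀ cur acc,
    PySem.Chars.splitOn.go [','] fuel l cur acc
      = acc.reverse ++ (sp l).modifyHead (cur.reverse ++ ·) := by
  induction fuel with
  | zero => intro l h; omega
  | succ n ih =>
    intro l h cur acc
    match l with
    | [] => simp [PySem.Chars.splitOn.go, sp]
    | c :: rest =>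
      rw [PySem.Chars.splitOn.go]
      by_cases hc : c = ','
      · subst hc
        simp only [List.isPrefixOf, BEq.rfl, Bool.true_and, if_pos,
          List.length_cons, List.length_nil, List.drop_succ_cons, List.drop_zero]
        rw [ih rest (by simpa using Nat.lt_of_succ_lt_succ h)]
        simp only [sp, List.reverse_cons, List.reverse_nil, List.nil_append, List.modifyHead,
          List.append_assoc]
        cases sp rest <;> simp
      · have hp : [','].isPrefixOf (c :: rest) = false := by
          simp [List.isPrefixOf]; exact fun h => absurd h.symm hc
        rw [hp]
        simp only [Bool.false_eq_true, if_false]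
        rw [ih rest (by simpa using Nat.lt_of_succ_lt_succ h)]
        simp only [sp, hc, if_false, List.modifyHead_modifyHead, List.reverse_cons]
        have : ((fun x => cur.reverse ++ x) ∘ fun x => c :: x)
             = (fun x => cur.reverse ++ [c] ++ x) := by funext x; simp
        rw [this]

theorem splitOn_eq_sp (l : List Char) : PySem.Chars.splitOn l [','] = sp l := by
  rw [PySem.Chars.splitOn, go_eq (l.length + 1) l (by omega)]
  simp only [List.reverse_nil, List.nil_append]
  cases hsp : sp l <;> simp [List.modifyHead]

theorem sp_ne_nil (l : List Char) : sp l ≠ [] := by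
  match l with
  | [] => simp [sp]
  | c :: rest =>
    simp only [sp]
    split
    · simp
    · cases h : sp rest with
      | nil => exact absurd h (sp_ne_nil rest)
      | cons x xs => simp [List.modifyHead]

-- the 'if item: result.append(item)' loop body, as a filterMap
def pick (s : List Char) : Option String :=
  let item := String.ofList (PySem.Chars.strip s)
  if item ≠ "" then some item else none

theorem inner_foldl (l : List (List Char)) (acc : List String) :
    l.foldl (fun result part =>
        let item := String.ofList (PySem.Chars.strip part)
        if item ≠ "" then result ++ [item] else result) acc
      = acc ++ l.filterMap pick := by
  induction l generalizing acc with
  | nil => simp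
  | cons p l ih =>
    simp only [List.foldl_cons, List.filterMap_cons, ih, pick]
    by_cases h : String.ofList (PySem.Chars.strip p) ≠ "" <;> simp [h]

theorem outer_foldl (vs : List String) (acc : List String) :
    vs.foldl (fun result value =>
        (PySem.Chars.splitOn value.toList ",".toList).foldl (fun result part =>
          let item := String.ofList (PySem.Chars.strip part)
          if item ≠ "" then result ++ [item] else result) result) acc
      = acc ++ vs.flatMap (fun value => (sp value.toList).filterMap pick) := by
  have hf : (fun (result : List String) (value : String) =>
      (PySem.Chars.splitOn value.toList ",".toList).foldl (fun result part =>
        let item := String.ofList (PySem.Chars.strip part)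
        if item ≠ "" then result ++ [item] else result) result)
      = fun result value => result ++ (sp value.toList).filterMap pick := by
    funext result value
    rw [show (",".toList : List Char) = [','] from rfl, splitOn_eq_sp, inner_foldl]
  rw [hf, PySem.List.foldl_append_eq_flatMap]

-- ===== B-side lemmas =====

theorem ofList_ne_empty_iff (l : List Char) : String.ofList l ≠ "" ↔ l ≠ [] := by
  constructor <;> intro h <;> intro hh <;> apply h
  · subst hh; rfl
  · cases l with | nil => rfl | cons c cs => exact absurd (congrArg String.toList hh) (by simp)

theorem strip_cons_space {c : Char} (hc : PySem.Chars.isspace c = true) (l : List Char) :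
    PySem.Chars.strip (c :: l) = PySem.Chars.strip l := by
  simp [PySem.Chars.strip, PySem.Chars.lstrip, hc]

-- flushing the machine's buffer agrees with strip of the pending head segment
theorem flush_eq (buf pend : List Char)
    (hl : List.dropWhile PySem.Chars.isspace buf = buf)
    (hr : List.dropWhile PySem.Chars.isspace buf.reverse = buf.reverse)
    (hp : pend.all PySem.Chars.isspace)
    (he : buf = [] → pend = []) :
    pick (buf ++ pend) = (if buf ≠ [] then some (String.ofList buf) else none) := by
  by_cases hb : buf = []
  · subst hb; rw [he rfl]; simp [pick, PySem.Chars.strip, PySem.Chars.lstrip, PySem.Chars.rstrip]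
  · have hstrip : PySem.Chars.strip (buf ++ pend) = buf := by
      unfold PySem.Chars.strip PySem.Chars.lstrip PySem.Chars.rstrip
      rw [List.dropWhile_append, hl]
      simp only [List.isEmpty_iff, hb, if_false]
      rw [List.reverse_append]
      rw [List.dropWhile_append]
      have hpd : List.dropWhile PySem.Chars.isspace pend.reverse = [] := by
        rw [List.dropWhile_eq_nil_iff]
        intro x hx; exact (List.all_eq_true.mp hp) x (List.mem_reverse.mp hx)
      rw [hpd]
      simp [hr]
    simp [pick, hstrip, hb, (ofList_ne_empty_iff buf).mpr hb]

-- the machine on one value computes filterMap pick over the ','-segments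
theorem machine_eq (l : List Char) : ∀ (res : List String) (buf pend : List Char),
    List.dropWhile PySem.Chars.isspace buf = buf →
    List.dropWhile PySem.Chars.isspace buf.reverse = buf.reverse →
    pend.all PySem.Chars.isspace →
    (buf = [] → pend = []) →
    (let st := l.foldl pvStepB (res, buf, pend)
     st.1 ++ (if st.2.1 ≠ [] then [String.ofList st.2.1] else []))
      = res ++ ((sp l).modifyHead (fun h => buf ++ pend ++ h)).filterMap pick := by
  induction l with
  | nil =>
    intro res buf pend hl hr hp he
    simp only [List.foldl_nil, sp, List.modifyHead, List.filterMap_cons, List.filterMap_nil,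
      List.append_nil]
    rw [flush_eq buf pend hl hr hp he]
    by_cases hb : buf = [] <;> simp [hb]
  | cons c rest ih =>
    intro res buf pend hl hr hp he
    simp only [List.foldl_cons]
    by_cases hc : c = ','
    · subst hc
      rw [show pvStepB (res, buf, pend) ',' =
          (res ++ (if buf ≠ [] then [String.ofList buf] else []), [], []) from by
        simp [pvStepB]]
      rw [ih _ [] [] (by simp) (by simp) (by simp) (fun _ => rfl)]
      rw [show sp (',' :: rest) = [] :: sp rest from by simp [sp]]
      cases h : sp rest with
      | nil => exact absurd h (sp_ne_nil rest)
      | cons x xs =>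
        simp only [List.modifyHead, List.filterMap_cons, List.append_nil]
        rw [flush_eq buf pend hl hr hp he]
        by_cases hb : buf = [] <;> simp [hb]
    · have hsp : sp (c :: rest) = (sp rest).modifyHead (c :: ·) := by simp [sp, hc]
      by_cases hs : PySem.Chars.isspace c = true
      · rw [show pvStepB (res, buf, pend) c =
            (res, buf, if buf ≠ [] then pend ++ [c] else pend) from by
          simp [pvStepB, hc, hs]]
        by_cases hb : buf = []
        · subst hb
          rw [he rfl]
          simp only [ne_eq, not_true_eq_false, if_false]
          rw [ih res [] [] (by simp) (by simp) (by simp) (fun _ => rfl)]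
          rw [hsp]
          cases h : sp rest with
          | nil => exact absurd h (sp_ne_nil rest)
          | cons x xs =>
            simp only [List.modifyHead, List.nil_append, List.filterMap_cons]
            rw [show pick (c :: x) = pick x from by simp [pick, strip_cons_space hs]]
        · simp only [ne_eq, hb, not_false_eq_true, if_pos]
          rw [ih res buf (pend ++ [c]) hl hr
            (by simp_all [List.all_eq_true]) (fun h => absurd h hb)]
          rw [hsp]
          cases h : sp rest with
          | nil => exact absurd h (sp_ne_nil rest)
          | cons x xs => simp [List.modifyHead]
      · rw [show pvStepB (res, buf, pend) c = (res, buf ++ pend ++ [c], []) from by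
          simp [pvStepB, hc, hs]]
        rw [ih res (buf ++ pend ++ [c]) []
          (by
            rw [List.append_assoc, List.dropWhile_append]
            by_cases hb : buf = []
            · subst hb; rw [he rfl]; simp [hs]
            · rw [hl]; simp [List.isEmpty_iff, hb])
          (by
            simp only [List.reverse_append, List.reverse_cons, List.reverse_nil, List.nil_append]
            simp [hs])
          (by simp) (by simp)]
        rw [hsp]
        cases h : sp rest with
        | nil => exact absurd h (sp_ne_nil rest)
        | cons x xs => simp [List.modifyHead]

-- ===== VERDICT (by name: the statement is the Claim_ definition above) =====
theorem split_repeated_csv_py_spec : Claim_equal_split_repeated_csv_py := by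
  unfold Claim_equal_split_repeated_csv_py
  intro values _
  unfold Spec_split_repeated_csv_py split_repeated_csv_py split_repeated_csv_py_alt
  have hbody : (fun (result : List String) (value : String) =>
      let st := value.toList.foldl pvStepB (result, [], [])
      st.1 ++ (if st.2.1 ≠ [] then [String.ofList st.2.1] else []))
      = fun result value => result ++ (sp value.toList).filterMap pick := by
    funext result value
    rw [machine_eq value.toList result [] [] (by simp) (by simp) (by simp) (fun _ => rfl)]
    congr 1
    cases h : sp value.toList with
    | nil => exact absurd h (sp_ne_nil value.toList)
    | cons x xs => simp [List.modifyHead]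
  match values with
  | none => rfl
  | some vs =>
    match vs with
    | [] => simp
    | v :: vs' =>
      simp only [reduceCtorEq, if_false, Option.getD_some]
      rw [outer_foldl, hbody, PySem.List.foldl_append_eq_flatMap]
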